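-- pv_equiv track=rewrite | github.com/joao-opensc/advent-of-code | 02/24_d2_p1.py | solve
-- ===== SOURCE A (Python) =====
-- def solve(input_str):
--     # Parse input into list of number lists
--     reports = [[int(x) for x in line.split()] for line in input_str.strip().splitlines()]
--
--     safe_count = 0
--     for levels in reports:
--         # Check if levels are strictly increasing or decreasing
--         differences = [levels[i+1] - levels[i] for i in range(len(levels)-1)]
--         all_increasing = all(d > 0 for d in differences)
--         all_decreasing = all(d < 0 for d in differences)
--
--         # Check if adjacent differences are between 1 and 3
--         valid_differences = all(1 <= abs(d) <= 3 for d in differences)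
--
--         if valid_differences and (all_increasing or all_decreasing):
--             safe_count += 1
--
--     return safe_count
-- ===== SOURCE B (Python) =====
-- def solve(input_str):
--     safe_count = 0
--     for line in input_str.strip().splitlines():
--         levels = [int(x) for x in line.split()]
--         if _safe(levels):
--             safe_count += 1
--     return safe_count
--
--
-- def _safe(levels):
--     # single pass: fix the direction from the first gap, then walk the rest
--     if len(levels) < 2:
--         return True
--     d = levels[1] - levels[0]
--     if not (1 <= abs(d) <= 3):
--         return False
--     return _run(d > 0, levels[1:])
--
--
-- def _run(up, rest):
--     while len(rest) >= 2:
--         d = rest[1] - rest[0]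
--         if not (1 <= abs(d) <= 3) or (d > 0) != up:
--             return False
--         rest = rest[1:]
--     return True
-- ===== Notes on version B (the rewrite author's own statement) =====
-- stated objective: alternative
-- what changed: Instead of building a differences list per report and scanning it three times with all(), B decides each report in one short-circuiting left-to-right pass: the direction is fixed by the first gap and every later gap is checked for magnitude 1..3 and matching sign.
import Mathlib
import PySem

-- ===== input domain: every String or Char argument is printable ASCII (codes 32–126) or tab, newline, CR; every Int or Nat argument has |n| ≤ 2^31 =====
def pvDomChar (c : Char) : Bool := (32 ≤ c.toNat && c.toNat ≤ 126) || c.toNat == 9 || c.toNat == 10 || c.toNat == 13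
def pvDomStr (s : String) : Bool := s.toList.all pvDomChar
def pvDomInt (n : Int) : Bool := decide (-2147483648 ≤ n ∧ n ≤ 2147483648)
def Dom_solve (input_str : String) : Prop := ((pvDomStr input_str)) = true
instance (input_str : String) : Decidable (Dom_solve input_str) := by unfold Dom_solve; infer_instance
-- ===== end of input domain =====

-- B replaces A's per-report differences list and three all() scans by one short-circuiting
-- left-to-right pass that fixes the direction from the first gap (objective: alternative).

-- ===== PORT A =====
-- int(x); Pre_solve excludes the `none` (ValueError) case, so the default is never used on admitted inputs
def pyInt (s : String) : Int := (PySem.Int.ofStr? s).getD 0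

def parseA (input_str : String) : List (List Int) :=
  (PySem.Str.splitlines (PySem.Str.strip input_str)).map
    (fun line => (PySem.Str.split₀ line).map pyInt)

-- differences = [levels[i+1] - levels[i] for i in range(len(levels)-1)]; indices are always in
-- range, so pyGetD's default is never used
def diffsA (levels : List Int) : List Int :=
  (PySem.List.pyRange 0 ((levels.length : Int) - 1) 1).map
    (fun i => PySem.List.pyGetD levels (i + 1) 0 - PySem.List.pyGetD levels i 0)

def solve (input_str : String) : Int :=
  (parseA input_str).foldl
    (fun safe_count levels =>
      let differences := diffsA levels
      let all_increasing := differences.all (fun d => decide (d > 0))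
      let all_decreasing := differences.all (fun d => decide (d < 0))
      let valid_differences := differences.all (fun d => decide (1 ≤ |d| ∧ |d| ≤ 3))
      if valid_differences && (all_increasing || all_decreasing) then safe_count + 1
      else safe_count)
    0

-- ===== PORT B =====
-- the while-loop of _run: walk the remaining levels, checking each gap against the fixed direction
def runB (up : Bool) : List Int → Bool
  | x :: y :: rest =>
    if ¬(1 ≤ |y - x| ∧ |y - x| ≤ 3) ∨ decide (y - x > 0) ≠ up then false
    else runB up (y :: rest)
  | _ => true

def safeB (levels : List Int) : Bool :=
  match levels with
  | a :: b :: rest =>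
    let d := b - a
    if ¬(1 ≤ |d| ∧ |d| ≤ 3) then false
    else runB (decide (d > 0)) (b :: rest)
  | _ => true

def solve_alt (input_str : String) : Int :=
  (PySem.Str.splitlines (PySem.Str.strip input_str)).foldl
    (fun safe_count line =>
      if safeB ((PySem.Str.split₀ line).map pyInt) then safe_count + 1 else safe_count)
    0

-- ===== PRECONDITION & SPEC =====
-- Pre_ excludes exactly the inputs on which int() raises ValueError (a token not parseable as an integer)
def Pre_solve (input_str : String) : Prop :=
  ((PySem.Str.splitlines (PySem.Str.strip input_str)).all
    (fun line => (PySem.Str.split₀ line).all (fun t => (PySem.Int.ofStr? t).isSome))) = true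
instance (input_str : String) : Decidable (Pre_solve input_str) := by unfold Pre_solve; infer_instance

def pvWitness_solve : String := "1 2 4\n9 3 1\n5 5 5"

def Spec_solve (input_str : String) (out : Int) : Prop := out = solve_alt input_str
instance (input_str : String) (out : Int) : Decidable (Spec_solve input_str out) := by unfold Spec_solve; infer_instance

-- ===== CLAIM (what is proved, stated in full; the proofs are below) =====
def Claim_equal_solve : Prop := ∀ (input_str : String), Dom_solve input_str → Pre_solve input_str → Spec_solve input_str (solve input_str)

-- ===== LEMMAS AND PROOFS =====

-- A's differences list, with the range/index machinery removed: the adjacent-pair differences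
def pairDiffs : List Int → List Int
  | a :: b :: r => (b - a) :: pairDiffs (b :: r)
  | _ => []

lemma pairDiffs_nat (xs : List Int) :
    (List.range (xs.length - 1)).map (fun i => xs.getD (i + 1) 0 - xs.getD i 0) = pairDiffs xs := by
  induction xs with
  | nil => simp [pairDiffs]
  | cons a t ih =>
    cases t with
    | nil => simp [pairDiffs]
    | cons b r =>
      rw [show (a :: b :: r).length - 1 = (b :: r).length - 1 + 1 by simp,
        List.range_succ_eq_map]
      simp only [List.map_cons, List.map_map]
      rw [pairDiffs]
      refine List.cons_eq_cons.mpr ⟨by simp, ?_⟩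
      rw [← ih]
      apply List.map_congr_left
      intro i _
      simp [Function.comp]

lemma diffsA_eq (xs : List Int) : diffsA xs = pairDiffs xs := by
  cases xs with
  | nil => simp [diffsA, pairDiffs, PySem.List.pyRange]
  | cons a t =>
    unfold diffsA
    rw [show ((a :: t).length : Int) - 1 = ((a :: t).length - 1 : Nat) by simp,
      PySem.List.pyRange_zero_natCast, List.map_map, ← pairDiffs_nat]
    apply List.map_congr_left
    intro i _
    simp only [Function.comp_apply]
    rw [show ((i : Int) + 1) = ((i + 1 : Nat) : Int) by push_cast; ring,
      PySem.List.pyGetD_natCast, PySem.List.pyGetD_natCast]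

lemma all_and (l : List Int) (f g : Int → Bool) :
    l.all (fun x => f x && g x) = (l.all f && l.all g) := by
  induction l with
  | nil => simp
  | cons x t ih =>
    simp only [List.all_cons, ih]
    cases f x <;> cases g x <;> cases t.all f <;> cases t.all g <;> simp

lemma runB_eq (up : Bool) (ys : List Int) :
    runB up ys = (pairDiffs ys).all
      (fun d => decide (1 ≤ |d| ∧ |d| ≤ 3) && (decide (d > 0) == up)) := by
  induction ys with
  | nil => simp [runB, pairDiffs]
  | cons x t ih =>
    cases t with
    | nil => simp [runB, pairDiffs]
    | cons y rest =>
      rw [runB, pairDiffs]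
      simp only [List.all_cons]
      by_cases hv : 1 ≤ |y - x| ∧ |y - x| ≤ 3
      · by_cases hs : decide (y - x > 0) = up
        · rw [if_neg (not_or.mpr ⟨not_not_intro hv, not_not_intro hs⟩), ih]
          have hs' : (decide (y - x > 0) == up) = true := by rw [hs]; simp
          simp only [List.all_cons, decide_eq_true hv, hs', Bool.true_and]
        · rw [if_pos (Or.inr hs), beq_eq_false_iff_ne.mpr hs]
          simp
      · rw [if_pos (Or.inl hv)]
        simp [hv]

-- per-report: B's single pass decides exactly A's three-scan condition
lemma safeB_eq_condA (xs : List Int) :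
    safeB xs =
      ((pairDiffs xs).all (fun d => decide (1 ≤ |d| ∧ |d| ≤ 3)) &&
        ((pairDiffs xs).all (fun d => decide (d > 0)) ||
         (pairDiffs xs).all (fun d => decide (d < 0)))) := by
  match xs with
  | [] => simp [safeB, pairDiffs]
  | [a] => simp [safeB, pairDiffs]
  | a :: b :: r =>
    rw [pairDiffs]
    simp only [safeB]
    rcases Decidable.em (1 ≤ |b - a| ∧ |b - a| ≤ 3) with hv | hv
    · rw [if_neg (not_not_intro hv), runB_eq]
      rcases lt_or_gt_of_ne (by rcases hv with ⟨h1, _⟩; intro h0; rw [h0] at h1; simp at h1 :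
          b - a ≠ 0) with hneg | hpos
      · have hup : decide (b - a > 0) = false := by simp; omega
        rw [hup]
        have hpt : (fun d : Int => decide (1 ≤ |d| ∧ |d| ≤ 3) && (decide (d > 0) == false)) =
            (fun d : Int => decide (1 ≤ |d| ∧ |d| ≤ 3) && decide (d < 0)) := by
          funext d
          rcases Decidable.em (1 ≤ |d| ∧ |d| ≤ 3) with hd | hd
          · have : (decide (d > 0) == false) = decide (d < 0) := by
              rcases lt_trichotomy d 0 with h | h | h
              · simp [h, show ¬ d > 0 by omega]
              · exfalso; rw [h] at hd; simp at hd
              · simp [h, show ¬ d < 0 by omega]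
            simp [this]
          · simp [hd]
        rw [hpt, all_and]
        simp only [List.all_cons, decide_eq_true hv, hup,
          decide_eq_true (show b - a < 0 from hneg)]
        cases h1 : ((pairDiffs (b :: r)).all fun d => decide (1 ≤ |d| ∧ |d| ≤ 3)) <;>
          cases h2 : ((pairDiffs (b :: r)).all fun d => decide (d < 0)) <;>
          cases h3 : ((pairDiffs (b :: r)).all fun d => decide (d > 0)) <;> simp
      · have hup : decide (b - a > 0) = true := by simp; omega
        rw [hup]
        have hpt : (fun d : Int => decide (1 ≤ |d| ∧ |d| ≤ 3) && (decide (d > 0) == true)) =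
            (fun d : Int => decide (1 ≤ |d| ∧ |d| ≤ 3) && decide (d > 0)) := by
          funext d; simp
        rw [hpt, all_and]
        simp only [List.all_cons, decide_eq_true hv, hup,
          decide_eq_false (show ¬ b - a < 0 by omega)]
        cases h1 : ((pairDiffs (b :: r)).all fun d => decide (1 ≤ |d| ∧ |d| ≤ 3)) <;>
          cases h2 : ((pairDiffs (b :: r)).all fun d => decide (d < 0)) <;>
          cases h3 : ((pairDiffs (b :: r)).all fun d => decide (d > 0)) <;> simp
    · rw [if_pos hv]
      simp only [List.all_cons, decide_eq_false hv, Bool.false_and]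

-- ===== VERDICT (by name: the statement is the Claim_ definition above) =====
theorem solve_spec : Claim_equal_solve := by
  intro input_str _ _
  unfold Spec_solve solve solve_alt parseA
  rw [List.foldl_map]
  apply PySem.List.foldl_congr_mem
  intro acc line _
  simp only [diffsA_eq, safeB_eq_condA]
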